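-- pv_equiv track=rewrite | github.com/DDokddoks/2023-Algorithm-Study | Week2/Emoji discount event/wi.py | calculate
-- ===== SOURCE A (Python) =====
-- def calculate(users, emoticons, discount):
--     cnt_user, sale_price = 0, 0
--
--     for percent, price in users:
--             cost = 0
--             for i, emoticon in enumerate(emoticons):
--                 if (discount[i] >= percent):
--                     cost += (emoticon * (100-discount[i])) // 100
--
--             if cost >= price: cnt_user += 1
--             else: sale_price += cost
--
--     return cnt_user, sale_price
-- ===== SOURCE B (Python) =====
-- def calculate(users, emoticons, discount):
--     pairs = sorted(((d, (e * (100 - d)) // 100) for e, d in zip(emoticons, discount)),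
--                    key=lambda p: -p[0])
--     ds = [p[0] for p in pairs]
--     prefix = [0]
--     for p in pairs:
--         prefix.append(prefix[-1] + p[1])
--     cnt_user, sale_price = 0, 0
--     for percent, price in users:
--         lo, hi = 0, len(ds)
--         while lo < hi:
--             mid = (lo + hi) // 2
--             if ds[mid] >= percent:
--                 lo = mid + 1
--             else:
--                 hi = mid
--         cost = prefix[lo]
--         if cost >= price:
--             cnt_user += 1
--         else:
--             sale_price += cost
--     return cnt_user, sale_price
-- ===== Notes on version B (the rewrite author's own statement) =====
-- stated objective: faster
-- what changed: Replaces the per-user scan over all emoticons by a one-time sort of (discount, discounted-price) pairs with prefix sums, answering each user by binary search.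
import Mathlib
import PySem

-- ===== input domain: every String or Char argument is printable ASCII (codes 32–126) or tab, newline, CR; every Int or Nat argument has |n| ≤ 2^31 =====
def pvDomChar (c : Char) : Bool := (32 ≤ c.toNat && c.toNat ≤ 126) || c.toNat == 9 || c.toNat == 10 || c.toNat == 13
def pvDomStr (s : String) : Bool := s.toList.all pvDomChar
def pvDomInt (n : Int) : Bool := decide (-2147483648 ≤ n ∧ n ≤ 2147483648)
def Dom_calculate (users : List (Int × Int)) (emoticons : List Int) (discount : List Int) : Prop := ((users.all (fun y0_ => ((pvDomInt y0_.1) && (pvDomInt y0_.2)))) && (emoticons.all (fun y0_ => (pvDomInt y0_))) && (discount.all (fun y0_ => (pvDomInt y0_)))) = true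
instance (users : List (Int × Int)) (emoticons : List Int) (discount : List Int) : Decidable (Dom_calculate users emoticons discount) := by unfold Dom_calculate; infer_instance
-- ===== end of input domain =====

-- B replaces A's per-user scan of all emoticons by a one-time sort of (discount, term)
-- pairs with prefix sums and a per-user binary search (objective: faster).

-- ===== PORT A =====
def calculate (users : List (Int × Int)) (emoticons : List Int) (discount : List Int) : Int × Int :=
  users.foldl (fun st u =>
    let cost := (PySem.List.enumerate emoticons 0).foldl (fun c ie =>
      if PySem.List.pyGetD discount ie.1 0 ≥ u.1 then
        c + PySem.Int.floordiv (ie.2 * (100 - PySem.List.pyGetD discount ie.1 0)) 100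
      else c) 0
    if cost ≥ u.2 then (st.1 + 1, st.2) else (st.1, st.2 + cost)) (0, 0)

-- ===== PORT B =====
-- hand-written binary search from Source B: first index in [lo, hi) with ds[i] < p (ds descending);
-- structural fuel = hi - lo (the gap shrinks each iteration, so the fuel never runs out)
def pvBsearchAux (ds : List Int) (p : Int) : Nat → Int → Int → Int
  | 0, lo, _ => lo
  | fuel + 1, lo, hi =>
    if lo < hi then
      let mid := PySem.Int.floordiv (lo + hi) 2
      if PySem.List.pyGetD ds mid 0 ≥ p then pvBsearchAux ds p fuel (mid + 1) hi
      else pvBsearchAux ds p fuel lo mid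
    else lo

def pvBsearch (ds : List Int) (p : Int) (lo hi : Int) : Int :=
  pvBsearchAux ds p (hi - lo).toNat lo hi

def calculate_alt (users : List (Int × Int)) (emoticons : List Int) (discount : List Int) : Int × Int :=
  let pairs := PySem.List.sorted ((emoticons.zip discount).map
      (fun ed => (ed.2, PySem.Int.floordiv (ed.1 * (100 - ed.2)) 100))) (fun q => -q.1) false
  let ds := pairs.map (fun q => q.1)
  let pre := pairs.foldl (fun pr q => pr ++ [PySem.List.pyGetD pr (-1) 0 + q.2]) [0]
  users.foldl (fun st u =>
    let lo := pvBsearch ds u.1 0 (ds.length : Int)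
    let cost := PySem.List.pyGetD pre lo 0
    if cost ≥ u.2 then (st.1 + 1, st.2) else (st.1, st.2 + cost)) (0, 0)

-- ===== PRECONDITION & SPEC =====
-- Pre_ excludes exactly the inputs where A raises IndexError: a nonempty users list with
-- discount shorter than emoticons (A indexes discount[i] for every emoticon index i).
def Pre_calculate (users : List (Int × Int)) (emoticons : List Int) (discount : List Int) : Prop :=
  users = [] ∨ emoticons.length ≤ discount.length
instance (users : List (Int × Int)) (emoticons : List Int) (discount : List Int) : Decidable (Pre_calculate users emoticons discount) := by unfold Pre_calculate; infer_instance
def pvWitness_calculate : (List (Int × Int)) × List Int × List Int := ([(50, 3)], [100], [60])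

def Spec_calculate (users : List (Int × Int)) (emoticons : List Int) (discount : List Int) (out : Int × Int) : Prop := out = calculate_alt users emoticons discount
instance (users : List (Int × Int)) (emoticons : List Int) (discount : List Int) (out : Int × Int) : Decidable (Spec_calculate users emoticons discount out) := by unfold Spec_calculate; infer_instance

-- ===== CLAIM (what is proved, stated in full; the proofs are below) =====
def Claim_equal_calculate : Prop := ∀ (users : List (Int × Int)) (emoticons : List Int) (discount : List Int), Dom_calculate users emoticons discount → Pre_calculate users emoticons discount → Spec_calculate users emoticons discount (calculate users emoticons discount)
-- ===== LEMMAS AND PROOFS =====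

-- L1: conditional-add fold = sum of filtered map
theorem pv_foldl_condadd {α : Type} (P : α → Prop) [DecidablePred P] (f : α → Int) :
    ∀ (l : List α) (c : Int),
      l.foldl (fun acc x => if P x then acc + f x else acc) c
        = c + ((l.filter (fun x => decide (P x))).map f).sum := by
  intro l
  induction l with
  | nil => simp
  | cons x xs ih =>
    intro c
    by_cases h : P x <;> simp [List.foldl_cons, h, ih] <;> ring

-- L2: A's enumerate fold with absolute lookups = fold over the zip
theorem pv_foldA_eq_zip (D : List Int) (p : Int) :
    ∀ (em : List Int) (s : Nat) (c : Int), s + em.length ≤ D.length →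
      (PySem.List.enumerate em (s : Int)).foldl
        (fun c ie => if PySem.List.pyGetD D ie.1 0 ≥ p then
            c + PySem.Int.floordiv (ie.2 * (100 - PySem.List.pyGetD D ie.1 0)) 100 else c) c
      = (em.zip (D.drop s)).foldl
        (fun c ed => if ed.2 ≥ p then
            c + PySem.Int.floordiv (ed.1 * (100 - ed.2)) 100 else c) c := by
  intro em
  induction em with
  | nil => intro s c _; simp [PySem.List.enumerate_nil]
  | cons e es ih =>
    intro s c hlen
    have hs : s < D.length := by simp at hlen; omega
    rw [PySem.List.enumerate_cons, List.drop_eq_getElem_cons hs]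
    have hget : PySem.List.pyGetD D (s : Int) 0 = D[s] := by
      rw [PySem.List.pyGetD_natCast]; exact List.getD_eq_getElem _ _ hs
    have hcast : ((s : Int) + 1) = ((s + 1 : Nat) : Int) := by push_cast; ring
    simp only [List.foldl_cons, List.zip_cons_cons, hget, hcast]
    apply ih
    simp at hlen ⊢; omega

-- L3: filter = takeWhile on a list descending in the first component
theorem pv_filter_eq_takeWhile (p : Int) :
    ∀ (l : List (Int × Int)), l.Pairwise (fun a b => b.1 ≤ a.1) →
      l.filter (fun x => decide (p ≤ x.1)) = l.takeWhile (fun x => decide (p ≤ x.1)) := by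
  intro l
  induction l with
  | nil => intro _; rfl
  | cons x xs ih =>
    intro hpw
    rcases List.pairwise_cons.1 hpw with ⟨hx, hxs⟩
    by_cases h : p ≤ x.1
    · rw [List.filter_cons_of_pos (by simpa using h), List.takeWhile_cons_of_pos (by simpa using h), ih hxs]
    · rw [List.filter_cons_of_neg (by simpa using h), List.takeWhile_cons_of_neg (by simpa using h)]
      rw [List.filter_eq_nil_iff]
      intro a ha
      have := hx a ha
      simp; omega

-- L4: takeWhile is the take of its own length
theorem pv_takeWhile_eq_take {α : Type} (l : List α) (p : α → Bool) :
    l.takeWhile p = l.take (l.takeWhile p).length := by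
  induction l with
  | nil => simp
  | cons x xs ih =>
    by_cases h : p x
    · rw [List.takeWhile_cons_of_pos h]; simpa using ih
    · rw [List.takeWhile_cons_of_neg h]; simp

theorem pv_takeWhile_len_le {α : Type} (l : List α) (p : α → Bool) :
    (l.takeWhile p).length ≤ l.length :=
  (List.takeWhile_prefix p).length_le

-- getElem just past the takeWhile prefix fails the predicate
theorem pv_takeWhile_getElem_false {a : Type} (q : a → Bool) :
    ∀ (l : List a) (h : (l.takeWhile q).length < l.length), q (l[(l.takeWhile q).length]'h) = false := by
  intro l
  induction l with
  | nil => intro h; simp at h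
  | cons x xs ih =>
    intro h
    by_cases hx : q x
    · have h' : (List.takeWhile q xs).length < xs.length := by
        simp only [List.takeWhile_cons_of_pos hx, List.length_cons] at h; omega
      simp only [List.takeWhile_cons_of_pos hx, List.length_cons, List.getElem_cons_succ]
      exact ih h'
    · simp only [List.takeWhile_cons_of_neg hx, List.length_nil, List.getElem_cons_zero]
      simpa using hx

-- L5: on a descending list, p ≤ l[j] iff j is inside the takeWhile prefix
theorem pv_char (l : List Int) (hpw : l.Pairwise (fun a b => b ≤ a)) (p : Int)
    (j : Nat) (hj : j < l.length) :
    p ≤ l[j] ↔ j < (l.takeWhile (fun d => decide (p ≤ d))).length := by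
  set q : Int → Bool := fun d => decide (p ≤ d) with hq
  set k := (l.takeWhile q).length with hk
  have hkle : k ≤ l.length := pv_takeWhile_len_le l q
  constructor
  · intro hpj
    by_contra hnot
    push_neg at hnot
    have hklt : k < l.length := lt_of_le_of_lt hnot hj
    have hfail : ¬ p ≤ l[k] := by
      have := pv_takeWhile_getElem_false q l hklt
      simpa [hq] using this
    rcases Nat.eq_or_lt_of_le hnot with he | hlt
    · exact hfail (he ▸ hpj)
    · have := (List.pairwise_iff_getElem.1 hpw) k j hklt hj hlt
      exact hfail (le_trans hpj this)
  · intro hjk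
    have hmem : l[j] ∈ l.takeWhile q := by
      rw [pv_takeWhile_eq_take l q, ← hk]
      have hlen : j < (l.take k).length := by simp; omega
      have hg : (l.take k)[j] = l[j] := List.getElem_take ..
      rw [← hg]
      exact List.getElem_mem hlen
    have := List.mem_takeWhile_imp hmem
    simpa [hq] using this

-- L6: the binary search lands exactly on the takeWhile-prefix length of a descending list
theorem pv_bs_eq (l : List Int) (hpw : l.Pairwise (fun a b => b ≤ a)) (p : Int) :
    ∀ (fuel : Nat) (lo hi : Int), (hi - lo).toNat ≤ fuel → 0 ≤ lo →
      lo ≤ ((l.takeWhile (fun d => decide (p ≤ d))).length : Int) →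
      ((l.takeWhile (fun d => decide (p ≤ d))).length : Int) ≤ hi → hi ≤ (l.length : Int) →
      pvBsearchAux l p fuel lo hi = ((l.takeWhile (fun d => decide (p ≤ d))).length : Int) := by
  set kN := (l.takeWhile (fun d => decide (p ≤ d))).length with hkN
  intro fuel
  induction fuel with
  | zero =>
    intro lo hi hf h0 hlk hkh hhl
    simp only [pvBsearchAux]
    omega
  | succ n ih =>
    intro lo hi hf h0 hlk hkh hhl
    simp only [pvBsearchAux]
    by_cases hlh : lo < hi
    · rw [if_pos hlh]
      have hb := PySem.Int.floordiv_two_mid_bounds (le_of_lt hlh)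
      have hmlt : PySem.Int.floordiv (lo + hi) 2 < hi := by
        rw [PySem.Int.floordiv_lt_iff_lt_mul (by norm_num)]; omega
      set mid := PySem.Int.floordiv (lo + hi) 2 with hmid
      have h0m : 0 ≤ mid := le_trans h0 hb.1
      have hmlen : mid.toNat < l.length := by omega
      have hget : PySem.List.pyGetD l mid 0 = l[mid.toNat] :=
        PySem.List.pyGetD_eq_getElem l 0 h0m (by omega)
      have hchar := pv_char l hpw p mid.toNat hmlen
      by_cases hc : PySem.List.pyGetD l mid 0 ≥ p
      · rw [if_pos hc]
        have hmk : mid.toNat < kN := hchar.1 (by rw [hget] at hc; exact hc)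
        exact ih (mid + 1) hi (by omega) (by omega) (by omega) hkh hhl
      · rw [if_neg hc]
        have hmk : ¬ mid.toNat < kN := fun hk => hc (by rw [ge_iff_le, hget]; exact hchar.2 hk)
        exact ih lo mid (by omega) h0 hlk (by omega) (by omega)
    · rw [if_neg hlh]; omega

-- L7: the prefix-building fold is a scanl
theorem pv_prefix_eq_scanl :
    ∀ (ps : List (Int × Int)) (pr : List Int) (acc : Int),
      ps.foldl (fun pr q => pr ++ [PySem.List.pyGetD pr (-1) 0 + q.2]) (pr ++ [acc])
        = pr ++ List.scanl (fun a q => a + q.2) acc ps := by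
  intro ps
  induction ps with
  | nil => intro pr acc; simp
  | cons x xs ih =>
    intro pr acc
    rw [List.foldl_cons]
    have hlast : PySem.List.pyGetD (pr ++ [acc]) (-1) 0 = acc :=
      PySem.List.pyGetD_neg_one_append_singleton ..
    rw [show (pr ++ [acc]) ++ [PySem.List.pyGetD (pr ++ [acc]) (-1) 0 + x.2]
          = (pr ++ [acc]) ++ [acc + x.2] from by rw [hlast]]
    rw [ih (pr ++ [acc]) (acc + x.2)]
    simp [List.scanl_cons]

-- L8: indexing a scanl of sums gives the sum of the corresponding take
theorem pv_scanl_getD :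
    ∀ (ps : List (Int × Int)) (acc : Int) (k : Nat), k ≤ ps.length →
      (List.scanl (fun a q => a + q.2) acc ps).getD k 0
        = acc + ((ps.take k).map (fun q => q.2)).sum := by
  intro ps
  induction ps with
  | nil =>
    intro acc k h
    simp at h
    subst h
    simp [List.scanl_nil]
  | cons x xs ih =>
    intro acc k hk
    cases k with
    | zero => simp [List.scanl_cons]
    | succ n =>
      rw [List.scanl_cons]
      have h1 : (acc :: List.scanl (fun a q => a + q.2) (acc + x.2) xs).getD (n + 1) 0
          = (List.scanl (fun a q => a + q.2) (acc + x.2) xs).getD n 0 := by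
        simp
      rw [h1, ih (acc + x.2) n (by simpa using hk)]
      simp [List.take_succ_cons]
      ring

-- specialisation of L2 to start index 0
theorem pv_foldA_zero (D : List Int) (p : Int) (em : List Int) (c : Int) (h : em.length ≤ D.length) :
    (PySem.List.enumerate em 0).foldl
        (fun c ie => if PySem.List.pyGetD D ie.1 0 ≥ p then
            c + PySem.Int.floordiv (ie.2 * (100 - PySem.List.pyGetD D ie.1 0)) 100 else c) c
      = (em.zip D).foldl
        (fun c ed => if ed.2 ≥ p then
            c + PySem.Int.floordiv (ed.1 * (100 - ed.2)) 100 else c) c := by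
  have h2 := pv_foldA_eq_zip D p em 0 c (by simpa using h)
  simpa using h2

-- the central lemma: A's per-user cost equals B's prefix-sum / binary-search cost
theorem pv_cost_eq (em dc : List Int) (h : em.length ≤ dc.length) (p : Int) :
    (PySem.List.enumerate em 0).foldl (fun c ie =>
        if PySem.List.pyGetD dc ie.1 0 ≥ p then
          c + PySem.Int.floordiv (ie.2 * (100 - PySem.List.pyGetD dc ie.1 0)) 100
        else c) 0
    = PySem.List.pyGetD
        ((PySem.List.sorted ((em.zip dc).map
            (fun ed => (ed.2, PySem.Int.floordiv (ed.1 * (100 - ed.2)) 100))) (fun q => -q.1) false).foldl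
          (fun pr q => pr ++ [PySem.List.pyGetD pr (-1) 0 + q.2]) [0])
        (pvBsearch ((PySem.List.sorted ((em.zip dc).map
            (fun ed => (ed.2, PySem.Int.floordiv (ed.1 * (100 - ed.2)) 100))) (fun q => -q.1) false).map (fun q => q.1))
          p 0 ((((PySem.List.sorted ((em.zip dc).map
            (fun ed => (ed.2, PySem.Int.floordiv (ed.1 * (100 - ed.2)) 100))) (fun q => -q.1) false).map (fun q => q.1)).length : Int))) 0 := by
  set g : Int × Int → Int × Int :=
    fun ed => (ed.2, PySem.Int.floordiv (ed.1 * (100 - ed.2)) 100) with hg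
  set zs := em.zip dc with hzs
  set pairs := PySem.List.sorted (zs.map g) (fun q => -q.1) false with hpairs
  set ds := pairs.map (fun q => q.1) with hds
  -- LHS = sum over the filtered zip
  have hLHS : (PySem.List.enumerate em 0).foldl (fun c ie =>
        if PySem.List.pyGetD dc ie.1 0 ≥ p then
          c + PySem.Int.floordiv (ie.2 * (100 - PySem.List.pyGetD dc ie.1 0)) 100
        else c) 0
      = ((zs.filter (fun ed => decide (p ≤ ed.2))).map
          (fun ed => PySem.Int.floordiv (ed.1 * (100 - ed.2)) 100)).sum := by
    rw [pv_foldA_zero dc p em 0 h]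
    rw [pv_foldl_condadd (fun ed : Int × Int => ed.2 ≥ p)
      (fun ed => PySem.Int.floordiv (ed.1 * (100 - ed.2)) 100) (em.zip dc) 0]
    simp [hzs, ge_iff_le]
  rw [hLHS]
  -- structure facts about pairs / ds
  have hperm : pairs.Perm (zs.map g) := PySem.List.sorted_perm ..
  have hpwp : pairs.Pairwise (fun a b => b.1 ≤ a.1) := by
    have := PySem.List.sorted_pairwise (xs := zs.map g) (key := fun q => -q.1)
    exact this.imp (fun hab => by omega)
  have hpwd : ds.Pairwise (fun a b => b ≤ a) := by
    rw [hds, List.pairwise_map]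
    exact hpwp
  have hlen : ds.length = pairs.length := by rw [hds, List.length_map]
  -- the binary search result
  set kN := (ds.takeWhile (fun d => decide (p ≤ d))).length with hkN
  have hkle : kN ≤ ds.length := pv_takeWhile_len_le ds _
  have hbs : pvBsearch ds p 0 ((ds.length : Int)) = (kN : Int) := by
    simp only [pvBsearch]
    exact pv_bs_eq ds hpwd p _ 0 (ds.length : Int) (by omega) le_rfl (by omega)
      (by exact_mod_cast hkle) le_rfl
  rw [hbs]
  -- the prefix list is a scanl
  have hpre : pairs.foldl (fun pr q => pr ++ [PySem.List.pyGetD pr (-1) 0 + q.2]) [0]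
      = List.scanl (fun a q => a + q.2) 0 pairs := by
    have := pv_prefix_eq_scanl pairs [] 0
    simpa using this
  rw [hpre]
  -- index the scanl
  have hkpairs : kN ≤ pairs.length := by omega
  rw [PySem.List.pyGetD_natCast, pv_scanl_getD pairs 0 kN hkpairs, zero_add]
  -- kN is also the takeWhile length of pairs
  have hkp : kN = (pairs.takeWhile (fun q => decide (p ≤ q.1))).length := by
    rw [hkN, hds, List.takeWhile_map, List.length_map]
    rfl
  -- take kN pairs = takeWhile = filter
  have htake : pairs.take kN = pairs.filter (fun q => decide (p ≤ q.1)) := by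
    rw [pv_filter_eq_takeWhile p pairs hpwp, hkp, ← pv_takeWhile_eq_take]
  rw [htake]
  -- transport the sum along the permutation
  have hps : ((pairs.filter (fun q => decide (p ≤ q.1))).map (fun q => q.2)).sum
      = (((zs.map g).filter (fun q => decide (p ≤ q.1))).map (fun q => q.2)).sum :=
    ((hperm.filter _).map _).sum_eq
  rw [hps]
  have hfm : (zs.map g).filter (fun q => decide (p ≤ q.1))
      = (zs.filter (fun ed => decide (p ≤ ed.2))).map g := by
    rw [List.filter_map]
    rfl
  rw [hfm, List.map_map]
  rfl

-- ===== VERDICT (by name: the statement is the Claim_ definition above) =====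
theorem calculate_spec : Claim_equal_calculate := by
  intro users em dc hdom hpre
  unfold Spec_calculate calculate calculate_alt
  rcases hpre with h | h
  · subst h; rfl
  · have hf : (fun (st : Int × Int) (u : Int × Int) =>
        let cost := (PySem.List.enumerate em 0).foldl (fun c ie =>
          if PySem.List.pyGetD dc ie.1 0 ≥ u.1 then
            c + PySem.Int.floordiv (ie.2 * (100 - PySem.List.pyGetD dc ie.1 0)) 100
          else c) 0
        if cost ≥ u.2 then (st.1 + 1, st.2) else (st.1, st.2 + cost))
      = (fun (st : Int × Int) (u : Int × Int) =>
        let cost := PySem.List.pyGetD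
          ((PySem.List.sorted ((em.zip dc).map
              (fun ed => (ed.2, PySem.Int.floordiv (ed.1 * (100 - ed.2)) 100))) (fun q => -q.1) false).foldl
            (fun pr q => pr ++ [PySem.List.pyGetD pr (-1) 0 + q.2]) [0])
          (pvBsearch ((PySem.List.sorted ((em.zip dc).map
              (fun ed => (ed.2, PySem.Int.floordiv (ed.1 * (100 - ed.2)) 100))) (fun q => -q.1) false).map (fun q => q.1))
            u.1 0 ((((PySem.List.sorted ((em.zip dc).map
              (fun ed => (ed.2, PySem.Int.floordiv (ed.1 * (100 - ed.2)) 100))) (fun q => -q.1) false).map (fun q => q.1)).length : Int))) 0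
        if cost ≥ u.2 then (st.1 + 1, st.2) else (st.1, st.2 + cost)) := by
      funext st u
      rw [pv_cost_eq em dc h u.1]
    exact congrArg (fun f => List.foldl f ((0 : Int), (0 : Int)) users) hf
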